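-- pv_equiv track=rewrite | github.com/Jamieee0531/singapore-housing-assistant | evaluate/retrieval_eval.py | _extract_sources_from_results
-- ===== SOURCE A (Python) =====
-- from typing import List
--
-- def _extract_sources_from_results(result_str: str) -> List[str]:
--     """
--     Parse the formatted tool output to extract source file names.
--
--     Args:
--         result_str: Formatted string from search_child_chunks
--
--     Returns:
--         List of source file names found in results
--     """
--     sources = []
--     for line in result_str.split("\n"):
--         if line.startswith("File Name:"):
--             source = line.replace("File Name:", "").strip()
--             if source and source not in sources:
--                 sources.append(source)
--     return sources
-- ===== SOURCE B (Python) =====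
-- from typing import List
--
-- def _extract_sources_from_results(result_str: str) -> List[str]:
--     sources = []
--     seen = set()
--     s = result_str
--     while True:
--         i = s.find("\n")
--         line = s if i == -1 else s[:i]
--         if line.startswith("File Name:"):
--             src = line.replace("File Name:", "").strip()
--             if src and src not in seen:
--                 seen.add(src)
--                 sources.append(src)
--         if i == -1:
--             return sources
--         s = s[i + 1:]
-- ===== Notes on version B (the rewrite author's own statement) =====
-- stated objective: alternative
-- what changed: Replaces splitting the text into a line list plus a loop with list-membership deduplication by a streaming scanner that walks the raw string with find/slice, never materializing a line list, and deduplicates with a hash set of seen sources.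
import Mathlib
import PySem

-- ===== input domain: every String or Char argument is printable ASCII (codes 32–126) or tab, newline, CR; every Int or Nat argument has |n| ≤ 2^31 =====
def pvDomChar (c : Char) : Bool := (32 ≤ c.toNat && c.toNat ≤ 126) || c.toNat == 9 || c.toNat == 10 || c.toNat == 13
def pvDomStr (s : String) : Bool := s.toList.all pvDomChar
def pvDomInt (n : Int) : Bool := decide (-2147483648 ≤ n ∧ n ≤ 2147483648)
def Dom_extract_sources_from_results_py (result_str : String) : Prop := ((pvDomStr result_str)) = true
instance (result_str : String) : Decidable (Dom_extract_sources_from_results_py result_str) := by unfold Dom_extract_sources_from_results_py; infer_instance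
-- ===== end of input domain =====

-- A splits the text into a line list and dedups with a linear list-membership test;
-- B is a streaming scanner over the raw string using find/slice with a set of seen
-- sources (objective: alternative).

-- ===== PORT A =====
-- literal port of A: one loop over split("\n"), appending when source is truthy and not yet in sources
def extract_sources_from_results_py (result_str : String) : List String :=
  ((PySem.Str.split? result_str "\n").getD []).foldl
    (fun sources line =>
      if PySem.Str.startswith line "File Name:" then
        let source := PySem.Str.strip (PySem.Str.replace line "File Name:" "")
        if source ≠ "" ∧ source ∉ sources then sources ++ [source] else sources
      else sources) []

-- ===== PORT B =====
-- termination fact for B's scanner: cutting past the first "\n" strictly shrinks the string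
theorem pvScan_dec (s : String) (h : PySem.Str.find s "\n" ≠ -1) :
    (PySem.Str.slice s (some (PySem.Str.find s "\n" + 1)) none).toList.length < s.toList.length := by
  have hfe : PySem.Str.find s "\n" = PySem.Chars.find s.toList ['\n'] := PySem.Str.find_eq s "\n"
  have hge := PySem.Chars.neg_one_le_find s.toList ['\n']
  have h0 : 0 ≤ PySem.Chars.find s.toList ['\n'] := by rw [hfe] at h; omega
  have hspec := (PySem.Chars.find_spec (s := s.toList) (sub := ['\n']) h0).1
  have hlt : (PySem.Chars.find s.toList ['\n']).toNat < s.toList.length := by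
    by_contra hge2
    rw [List.drop_eq_nil_of_le (by omega)] at hspec
    rw [List.prefix_nil] at hspec
    exact absurd hspec (by simp)
  rw [PySem.Str.toList_slice]
  unfold PySem.Chars.slice
  rw [hfe, PySem.List.slice_from s.toList (by omega)]
  rw [List.length_drop]
  omega

-- literal port of B's while-loop: state (s, seen, sources); each pass cuts at the first "\n"
def pvScan (s : String) (seen : PySem.Set String) (sources : List String) : List String :=
  let i := PySem.Str.find s "\n"
  let line := if i = -1 then s else PySem.Str.slice s none (some i)
  let st :=
    if PySem.Str.startswith line "File Name:" then
      let src := PySem.Str.strip (PySem.Str.replace line "File Name:" "")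
      if src ≠ "" ∧ ¬ (PySem.Set.contains seen src) = true then
        (PySem.Set.add seen src, sources ++ [src])
      else (seen, sources)
    else (seen, sources)
  if h : i = -1 then st.2
  else pvScan (PySem.Str.slice s (some (i + 1)) none) st.1 st.2
termination_by s.toList.length
decreasing_by exact pvScan_dec s h

def extract_sources_from_results_py_alt (result_str : String) : List String :=
  pvScan result_str PySem.Set.empty []

-- ===== PRECONDITION & SPEC =====
def Spec_extract_sources_from_results_py (result_str : String) (out : List String) : Prop := out = extract_sources_from_results_py_alt result_str
instance (result_str : String) (out : List String) : Decidable (Spec_extract_sources_from_results_py result_str out) := by unfold Spec_extract_sources_from_results_py; infer_instance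

-- ===== CLAIM (what is proved, stated in full; the proofs are below) =====
def Claim_equal_extract_sources_from_results_py : Prop := ∀ (result_str : String), Dom_extract_sources_from_results_py result_str → Spec_extract_sources_from_results_py result_str (extract_sources_from_results_py result_str)

-- ===== LEMMAS AND PROOFS =====

-- A's loop body, named for the proofs (definitionally the lambda in port A)
def pvStep (sources : List String) (line : String) : List String :=
  if PySem.Str.startswith line "File Name:" then
    let source := PySem.Str.strip (PySem.Str.replace line "File Name:" "")
    if source ≠ "" ∧ source ∉ sources then sources ++ [source] else sources
  else sources

-- cons-onto-head of the first piece (the shape splitOn.go produces)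
def pvConsHd (x : List Char) : List (List Char) → List (List Char)
  | [] => [x]
  | p :: ps => (x ++ p) :: ps

-- structural recursion computing split on the single character '\n'
def pvSplitNl : List Char → List (List Char)
  | [] => [[]]
  | a :: rest => if a = '\n' then [] :: pvSplitNl rest else pvConsHd [a] (pvSplitNl rest)

theorem pvSplitNl_ne_nil (s : List Char) : pvSplitNl s ≠ [] := by
  induction s with
  | nil => simp [pvSplitNl]
  | cons a rest ih =>
    simp only [pvSplitNl]
    split
    · simp
    · cases h : pvSplitNl rest with
      | nil => simp [pvConsHd]
      | cons p ps => simp [pvConsHd]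

theorem pvConsHd_nil {ms : List (List Char)} (h : ms ≠ []) : pvConsHd [] ms = ms := by
  cases ms with
  | nil => exact absurd rfl h
  | cons p ps => simp [pvConsHd]

theorem pvConsHd_consHd (x y : List Char) (ms : List (List Char)) :
    pvConsHd x (pvConsHd y ms) = pvConsHd (x ++ y) ms := by
  cases ms with
  | nil => simp [pvConsHd]
  | cons p ps => simp [pvConsHd]

theorem pv_go_spec : ∀ (fuel : Nat) (l cur : List Char) (_ : l.length < fuel) (accs : List (List Char)),
    PySem.Chars.splitOn.go ['\n'] fuel l cur accs = accs.reverse ++ pvConsHd cur.reverse (pvSplitNl l) := by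
  intro fuel
  induction fuel with
  | zero => intro l cur h accs; omega
  | succ fuel ih =>
    intro l cur h accs
    cases l with
    | nil =>
      rw [PySem.Chars.splitOn.go]
      simp [pvSplitNl, pvConsHd]
      omega
    | cons c rest =>
      rw [PySem.Chars.splitOn.go]
      by_cases hc : c = '\n'
      · have hp : ['\n'].isPrefixOf (c :: rest) = true := by simp [hc, List.isPrefixOf]
        rw [if_pos hp]
        have : List.drop (['\n'].length) (c :: rest) = rest := by simp
        rw [this, ih rest [] (by simp at h ⊢; omega) (cur.reverse :: accs)]
        simp only [pvSplitNl, if_pos hc, List.reverse_nil]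
        rw [pvConsHd_nil (pvSplitNl_ne_nil rest)]
        cases hs : pvSplitNl rest with
        | nil => exact absurd hs (pvSplitNl_ne_nil rest)
        | cons p ps => simp [pvConsHd]
      · have hp : ['\n'].isPrefixOf (c :: rest) = false := by
          simp [List.isPrefixOf]
          intro he; exact absurd he.symm hc
        rw [if_neg (by simp [hp])]
        rw [ih rest (c :: cur) (by simp at h ⊢; omega) accs]
        simp only [pvSplitNl, if_neg hc, List.reverse_cons]
        rw [pvConsHd_consHd]

theorem pv_splitOn_eq (s : List Char) : PySem.Chars.splitOn s ['\n'] = pvSplitNl s := by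
  show PySem.Chars.splitOn.go ['\n'] (s.length + 1) s [] [] = pvSplitNl s
  rw [pv_go_spec (s.length + 1) s [] (by omega) []]
  simp [pvConsHd_nil (pvSplitNl_ne_nil s)]

theorem pv_findgo_ge (l : List Char) : ∀ k : Nat, -1 ≤ PySem.Chars.find.go ['\n'] l k := by
  induction l with
  | nil => intro k; rw [PySem.Chars.find.go]; simp
  | cons a t ih =>
    intro k
    rw [PySem.Chars.find.go]
    split
    · omega
    · exact ih (k+1)

theorem pv_findgo_shift (l : List Char) : ∀ k : Nat,
    PySem.Chars.find.go ['\n'] l k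
      = if PySem.Chars.find.go ['\n'] l 0 = -1 then -1 else PySem.Chars.find.go ['\n'] l 0 + k := by
  have hnil : ∀ k : Nat, PySem.Chars.find.go ['\n'] ([] : List Char) k = -1 := by
    intro k; rw [PySem.Chars.find.go]; rfl
  induction l with
  | nil => intro k; rw [hnil, hnil]; simp
  | cons a t ih =>
    intro k
    by_cases hp : ['\n'].isPrefixOf (a :: t) = true
    · rw [PySem.Chars.find.go, if_pos hp]
      conv_rhs => rw [PySem.Chars.find.go, if_pos hp]
      simp
    · rw [PySem.Chars.find.go, if_neg hp]
      conv_rhs => rw [PySem.Chars.find.go, if_neg hp]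
      rw [ih (k+1), ih 1]
      have := pv_findgo_ge t 0
      by_cases h0 : PySem.Chars.find.go ['\n'] t 0 = -1
      · simp [h0]
      · rw [if_neg h0, if_neg h0, if_neg (by omega)]
        push_cast
        ring

theorem pv_find_cons (a : Char) (t : List Char) :
    PySem.Chars.find (a :: t) ['\n']
      = if a = '\n' then 0
        else if PySem.Chars.find t ['\n'] = -1 then -1 else PySem.Chars.find t ['\n'] + 1 := by
  show PySem.Chars.find.go ['\n'] (a :: t) 0 = _
  rw [PySem.Chars.find.go]
  by_cases hc : a = '\n'
  · have hp : ['\n'].isPrefixOf (a :: t) = true := by simp [hc, List.isPrefixOf]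
    rw [if_pos hp, if_pos hc]
    rfl
  · have hp : ['\n'].isPrefixOf (a :: t) = false := by
      simp [List.isPrefixOf]
      intro he; exact absurd he.symm hc
    rw [if_neg (by simp [hp]), if_neg hc, pv_findgo_shift t 1]
    show _ = if PySem.Chars.find.go ['\n'] t 0 = -1 then -1 else PySem.Chars.find.go ['\n'] t 0 + 1
    split <;> simp

theorem pvSplitNl_chunk (s : List Char) :
    pvSplitNl s = if PySem.Chars.find s ['\n'] = -1 then [s]
      else s.take (PySem.Chars.find s ['\n']).toNat
            :: pvSplitNl (s.drop ((PySem.Chars.find s ['\n']).toNat + 1)) := by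
  induction s with
  | nil =>
    have : PySem.Chars.find [] ['\n'] = -1 := by
      rw [PySem.Chars.find_eq_neg_one_iff]
      simp
    simp [this, pvSplitNl]
  | cons a t ih =>
    rw [pv_find_cons]
    by_cases hc : a = '\n'
    · simp only [pvSplitNl, if_pos hc]
      rw [if_neg (by simp)]
      simp [hc]
    · simp only [pvSplitNl, if_neg hc]
      by_cases h1 : PySem.Chars.find t ['\n'] = -1
      · rw [if_pos h1, if_pos rfl, ih, if_pos h1]
        simp [pvConsHd]
      · have hge := PySem.Chars.neg_one_le_find t ['\n']
        have h0 : 0 ≤ PySem.Chars.find t ['\n'] := by omega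
        rw [if_neg h1, if_neg (by omega), ih, if_neg h1]
        have htn : (PySem.Chars.find t ['\n'] + 1).toNat = (PySem.Chars.find t ['\n']).toNat + 1 := by omega
        rw [htn]
        simp [pvConsHd, List.take_succ_cons, List.drop_succ_cons]

-- the per-line state transition of B agrees with A's step
theorem pv_state_step (acc : List String) (line : String) :
    (if PySem.Str.startswith line "File Name:" then
      let src := PySem.Str.strip (PySem.Str.replace line "File Name:" "")
      if src ≠ "" ∧ ¬ (PySem.Set.contains acc src) = true then
        (PySem.Set.add acc src, acc ++ [src])
      else (acc, acc)
    else (acc, acc)) = (pvStep acc line, pvStep acc line) := by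
  unfold pvStep
  by_cases hs : PySem.Str.startswith line "File Name:" = true
  · rw [if_pos hs, if_pos hs]
    set src := PySem.Str.strip (PySem.Str.replace line "File Name:" "") with hsrc
    have hmem : (PySem.Set.contains acc src = true) ↔ src ∈ acc := by
      simp [PySem.Set.contains]
    by_cases h1 : src ≠ "" ∧ src ∉ acc
    · rw [if_pos ⟨h1.1, fun hc => h1.2 (hmem.mp hc)⟩, if_pos h1]
      have : PySem.Set.add acc src = acc ++ [src] := by
        unfold PySem.Set.add
        rw [if_neg (fun hc => h1.2 (hmem.mp hc))]
      rw [this]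
    · rw [if_neg (fun hcon => h1 ⟨hcon.1, fun hm => hcon.2 (hmem.mpr hm)⟩), if_neg h1]
  · rw [if_neg hs, if_neg hs]

-- base case of the main invariant: a string with no "\n" is a single line
theorem pv_main_neg (s : String) (acc : List String)
    (hfc : PySem.Chars.find s.toList ['\n'] = -1) :
    pvScan s acc acc = ((pvSplitNl s.toList).map String.ofList).foldl pvStep acc := by
  have hstr : PySem.Str.find s "\n" = -1 := by rw [PySem.Str.find_eq]; exact hfc
  rw [pvSplitNl_chunk, if_pos hfc]
  simp only [List.map_cons, List.map_nil, List.foldl_cons, List.foldl_nil, String.ofList_toList]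
  rw [pvScan]
  simp only [hstr]
  rw [pv_state_step]
  simp

theorem pv_main : ∀ (n : Nat) (s : String), s.toList.length ≤ n → ∀ acc : List String,
    pvScan s acc acc = ((pvSplitNl s.toList).map String.ofList).foldl pvStep acc := by
  intro n
  induction n with
  | zero =>
    intro s hs acc
    apply pv_main_neg
    have hnl : s.toList = [] := List.eq_nil_of_length_eq_zero (by omega)
    rw [hnl, PySem.Chars.find_eq_neg_one_iff]
    simp
  | succ n ih =>
    intro s hs acc
    by_cases hfc : PySem.Chars.find s.toList ['\n'] = -1
    · exact pv_main_neg s acc hfc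
    · have hstr : PySem.Str.find s "\n" = PySem.Chars.find s.toList ['\n'] := PySem.Str.find_eq s "\n"
      have hge := PySem.Chars.neg_one_le_find s.toList ['\n']
      have h0 : 0 ≤ PySem.Str.find s "\n" := by omega
      have hne : ¬ PySem.Str.find s "\n" = -1 := by omega
      have hline : String.ofList (s.toList.take (PySem.Chars.find s.toList ['\n']).toNat)
          = PySem.Str.slice s none (some (PySem.Str.find s "\n")) := by
        rw [← String.toList_inj, String.toList_ofList, PySem.Str.toList_slice]
        unfold PySem.Chars.slice
        rw [PySem.List.slice_to s.toList (by omega), hstr]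
      have hrest : (PySem.Str.slice s (some (PySem.Str.find s "\n" + 1)) none).toList
          = s.toList.drop ((PySem.Chars.find s.toList ['\n']).toNat + 1) := by
        rw [PySem.Str.toList_slice]
        unfold PySem.Chars.slice
        rw [PySem.List.slice_from s.toList (by omega)]
        congr 1
        omega
      rw [pvSplitNl_chunk, if_neg hfc]
      simp only [List.map_cons, List.foldl_cons]
      rw [hline, ← hrest]
      rw [pvScan]
      simp only [dif_neg hne, if_neg hne]
      rw [pv_state_step]
      have hlen : (PySem.Str.slice s (some (PySem.Str.find s "\n" + 1)) none).toList.length ≤ n := by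
        have := pvScan_dec s hne
        omega
      exact ih _ hlen _

theorem pv_lines_eq (s : String) :
    (PySem.Str.split? s "\n").getD [] = (pvSplitNl s.toList).map String.ofList := by
  unfold PySem.Str.split?
  have hsep : ("\n" : String).toList = ['\n'] := rfl
  rw [hsep]
  unfold PySem.Chars.split?
  rw [if_neg (by simp)]
  simp [pv_splitOn_eq]

-- ===== VERDICT (by name: the statement is the Claim_ definition above) =====
theorem extract_sources_from_results_py_spec : Claim_equal_extract_sources_from_results_py := by
  intro s _
  show extract_sources_from_results_py s = extract_sources_from_results_py_alt s
  unfold extract_sources_from_results_py extract_sources_from_results_py_alt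
  rw [pv_lines_eq]
  exact (pv_main s.toList.length s le_rfl []).symm
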